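-- pv_equiv track=rewrite | github.com/Destion/Projectmod7 | utilities/util.py | compareListsUnordered
-- ===== SOURCE A (Python) =====
-- def compareListsUnordered(l1, l2):
--     valueCounts = dict()
--     for e in l1 + l2:
--         valueCounts[e] = valueCounts.get(e, 0) + 1
--     for e in valueCounts:
--         if valueCounts[e] % 2 != 0:
--             return False
--     return True
-- ===== SOURCE B (Python) =====
-- def compareListsUnordered(l1, l2):
--     s = sorted(l1 + l2)
--     i = 0
--     while i + 1 < len(s):
--         if s[i] != s[i + 1]:
--             return False
--         i += 2
--     return i == len(s)
-- ===== Notes on version B (the rewrite author's own statement) =====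
-- stated objective: alternative
-- what changed: Sort the combined list once, then scan adjacent pairs: all counts are even iff the sorted list splits into consecutive equal pairs; no counting structure is maintained at all.
import Mathlib
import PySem

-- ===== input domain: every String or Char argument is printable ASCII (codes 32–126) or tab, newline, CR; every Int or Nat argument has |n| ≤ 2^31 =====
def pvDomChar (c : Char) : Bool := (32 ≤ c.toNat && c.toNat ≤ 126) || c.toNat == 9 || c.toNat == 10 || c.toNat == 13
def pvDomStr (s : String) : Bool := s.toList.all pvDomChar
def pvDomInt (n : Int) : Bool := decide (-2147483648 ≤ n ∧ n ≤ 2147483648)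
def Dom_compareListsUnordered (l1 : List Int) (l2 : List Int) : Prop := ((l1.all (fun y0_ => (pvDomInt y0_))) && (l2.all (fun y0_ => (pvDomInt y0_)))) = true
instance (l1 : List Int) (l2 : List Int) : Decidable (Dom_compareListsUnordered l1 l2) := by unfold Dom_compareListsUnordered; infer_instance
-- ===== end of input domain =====

-- B replaces A's count-dictionary + parity loop with a different algorithm: sort the combined
-- list once and scan it in adjacent pairs (all counts even iff the sorted list pairs up).


-- ===== PORT A =====
-- 'for e in valueCounts: if valueCounts[e] % 2 != 0: return False' (early return)
def pvCheckLoop (d : PySem.Dict Int Int) : List Int → Bool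
  | [] => true
  | e :: rest => if PySem.Int.mod (d.getD e 0) 2 ≠ 0 then false else pvCheckLoop d rest

def compareListsUnordered (l1 : List Int) (l2 : List Int) : Bool :=
  let valueCounts := (l1 ++ l2).foldl (fun d e => d.insert e (d.getD e 0 + 1)) PySem.Dict.empty
  pvCheckLoop valueCounts valueCounts.keys

-- ===== PORT B =====
-- the 'while i + 1 < len(s): if s[i] != s[i+1]: return False; i += 2' loop, then 'i == len(s)':
-- two-at-a-time structural recursion on the sorted list; the [_] case is 'i == len(s)' failing.
def pvPairLoop : List Int → Bool
  | [] => true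
  | [_] => false
  | a :: b :: rest => if a ≠ b then false else pvPairLoop rest

def compareListsUnordered_alt (l1 : List Int) (l2 : List Int) : Bool :=
  let s := PySem.List.sorted (l1 ++ l2) (fun x => x) false
  pvPairLoop s

-- ===== PRECONDITION & SPEC =====
def Spec_compareListsUnordered (l1 : List Int) (l2 : List Int) (out : Bool) : Prop := out = compareListsUnordered_alt l1 l2
instance (l1 : List Int) (l2 : List Int) (out : Bool) : Decidable (Spec_compareListsUnordered l1 l2 out) := by unfold Spec_compareListsUnordered; infer_instance

-- ===== CLAIM =====
def Claim_equal_compareListsUnordered : Prop := ∀ (l1 : List Int) (l2 : List Int), Dom_compareListsUnordered l1 l2 → Spec_compareListsUnordered l1 l2 (compareListsUnordered l1 l2)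

-- ===== LEMMAS AND PROOFS =====

-- A's early-return loop over the keys is 'all counts even'
theorem pvCheckLoop_eq_true_iff (d : PySem.Dict Int Int) (l : List Int) :
    pvCheckLoop d l = true ↔ ∀ e ∈ l, PySem.Int.mod (d.getD e 0) 2 = 0 := by
  induction l with
  | nil => simp [pvCheckLoop]
  | cons e rest ih =>
    by_cases h : PySem.Int.mod (d.getD e 0) 2 = 0
    · have hstep : pvCheckLoop d (e :: rest)
          = if PySem.Int.mod (d.getD e 0) 2 ≠ 0 then false else pvCheckLoop d rest := rfl
      rw [hstep, if_neg (not_ne_iff.mpr h), ih]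
      constructor
      · intro hall x hx
        rcases List.mem_cons.mp hx with rfl | hx'
        · exact h
        · exact hall x hx'
      · intro hall x hx
        exact hall x (List.mem_cons_of_mem _ hx)
    · have hstep : pvCheckLoop d (e :: rest)
          = if PySem.Int.mod (d.getD e 0) 2 ≠ 0 then false else pvCheckLoop d rest := rfl
      rw [hstep, if_pos h]
      simp only [Bool.false_eq_true, false_iff]
      intro hall
      exact h (hall e (by simp))

theorem compareListsUnordered_eq_true_iff (l1 l2 : List Int) :
    compareListsUnordered l1 l2 = true ↔ ∀ e ∈ l1 ++ l2, (l1 ++ l2).count e % 2 = 0 := by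
  unfold compareListsUnordered
  rw [PySem.Dict.foldl_insert_getD_add_one_eq_counter, pvCheckLoop_eq_true_iff]
  simp only [PySem.Dict.keys_counter, PySem.Set.mem_ofList, PySem.Dict.getD_counter]
  constructor <;> intro h e he <;> have := h e he
  · have : (2 : Int) ∣ ((l1 ++ l2).count e : Int) := by
      rw [← PySem.Int.mod_eq_zero_iff_dvd]; exact this
    omega
  · rw [PySem.Int.mod_eq_zero_iff_dvd]
    exact_mod_cast (Nat.dvd_of_mod_eq_zero this : 2 ∣ (l1 ++ l2).count e)

-- On a ≤-sorted list, the pair scan succeeds iff every element's count is even.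
theorem pvPairLoop_eq_true_iff (s : List Int) (hs : s.Pairwise (· ≤ ·)) :
    pvPairLoop s = true ↔ ∀ e ∈ s, s.count e % 2 = 0 := by
  induction s using pvPairLoop.induct with
  | case1 => simp [pvPairLoop]
  | case2 a =>
    simp [pvPairLoop, List.count_cons]
  | case3 a b rest hab =>
    rcases List.pairwise_cons.mp hs with ⟨ha, hs'⟩
    rcases List.pairwise_cons.mp hs' with ⟨hb, _⟩
    have hstep : pvPairLoop (a :: b :: rest) = false := by
      simp [pvPairLoop, hab]
    rw [hstep]
    simp only [Bool.false_eq_true, false_iff]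
    intro h
    have ha1 : (a :: b :: rest).count a = 1 := by
      have hnb : ¬ b = a := fun he => hab he.symm
      have hnr : a ∉ rest := by
        intro hr
        have h1 : a ≤ b := ha b (by simp)
        have h2 : b ≤ a := hb a hr
        exact hab (le_antisymm h1 h2)
      simp [hnb, List.count_eq_zero_of_not_mem hnr]
    have := h a (by simp)
    rw [ha1] at this
    omega
  | case4 a b rest hab ih =>
    have hab' : a = b := not_not.mp (by simpa using hab)
    subst hab'
    rcases List.pairwise_cons.mp hs with ⟨_, hs'⟩
    rcases List.pairwise_cons.mp hs' with ⟨_, hrest⟩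
    have hstep : pvPairLoop (a :: a :: rest) = pvPairLoop rest := by
      simp [pvPairLoop]
    rw [hstep, ih hrest]
    constructor
    · intro h e he
      simp only [List.count_cons, beq_iff_eq]
      by_cases hea : a = e
      · subst hea
        by_cases hmem : a ∈ rest
        · have := h a hmem; omega
        · simp [List.count_eq_zero_of_not_mem hmem]
      · have he'' : e ∈ rest := by
          rcases List.mem_cons.mp he with rfl | he'
          · exact absurd rfl hea
          · rcases List.mem_cons.mp he' with rfl | h2
            · exact absurd rfl hea
            · exact h2
        have := h e he''
        simp only [if_neg hea]
        omega
    · intro h e he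
      have := h e (List.mem_cons_of_mem _ (List.mem_cons_of_mem _ he))
      simp only [List.count_cons, beq_iff_eq] at this
      by_cases hea : a = e
      · simp only [if_pos hea] at this; omega
      · simp only [if_neg hea] at this; omega

theorem compareListsUnordered_alt_eq_true_iff (l1 l2 : List Int) :
    compareListsUnordered_alt l1 l2 = true ↔ ∀ e ∈ l1 ++ l2, (l1 ++ l2).count e % 2 = 0 := by
  unfold compareListsUnordered_alt
  have hperm : (PySem.List.sorted (l1 ++ l2) (fun x => x) false).Perm (l1 ++ l2) :=
    PySem.List.sorted_perm _ _ _
  have hpw : (PySem.List.sorted (l1 ++ l2) (fun x => x) false).Pairwise (· ≤ ·) := by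
    have := PySem.List.sorted_pairwise (xs := l1 ++ l2) (key := fun x => x)
    simpa using this
  rw [pvPairLoop_eq_true_iff _ hpw]
  constructor <;> intro h e he
  · have := h e (hperm.mem_iff.mpr he)
    rwa [hperm.count_eq] at this
  · rw [hperm.count_eq]
    exact h e (hperm.mem_iff.mp he)

-- ===== VERDICT =====
theorem compareListsUnordered_spec : Claim_equal_compareListsUnordered := by
  intro l1 l2 _
  unfold Spec_compareListsUnordered
  rw [Bool.eq_iff_iff, compareListsUnordered_eq_true_iff, compareListsUnordered_alt_eq_true_iff]
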